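-- pv_equiv track=rewrite | github.com/eunhyeon5322/CodingTest | 프로그래머스/0/181890. 왼쪽 오른쪽/왼쪽 오른쪽.py | solution
-- ===== SOURCE A (Python) =====
-- def solution(str_list):
--     result=[]
--     for i in str_list:
--         if i=='l':
--             left=str_list.index('l')
--             return str_list[:left]
--         elif i=='r':
--             right=str_list.index('r')
--             return str_list[right+1:]
--     return result
-- ===== SOURCE B (Python) =====
-- def solution(str_list):
--     n = len(str_list)
--     left = str_list.index('l') if 'l' in str_list else n
--     right = str_list.index('r') if 'r' in str_list else n
--     if left == n and right == n:
--         return []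
--     if left < right:
--         return str_list[:left]
--     return str_list[right + 1:]
-- ===== Notes on version B (the rewrite author's own statement) =====
-- stated objective: alternative
-- what changed: Replaces A's single-pass scan with in-loop early returns (plus a redundant .index call) by an 'index both candidates first, then compare positions' decomposition with length as the absent-sentinel.
import Mathlib
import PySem

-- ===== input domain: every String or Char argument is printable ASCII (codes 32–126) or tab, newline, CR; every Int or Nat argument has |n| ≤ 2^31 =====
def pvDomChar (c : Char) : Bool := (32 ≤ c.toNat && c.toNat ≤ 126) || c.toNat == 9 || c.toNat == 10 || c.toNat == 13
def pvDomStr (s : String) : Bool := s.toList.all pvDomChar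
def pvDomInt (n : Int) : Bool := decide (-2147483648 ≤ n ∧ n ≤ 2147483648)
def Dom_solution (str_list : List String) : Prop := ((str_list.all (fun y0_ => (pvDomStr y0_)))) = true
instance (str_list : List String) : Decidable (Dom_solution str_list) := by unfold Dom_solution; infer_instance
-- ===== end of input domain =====

-- B replaces A's early-return scan by "find both indices first, then compare"; objective: alternative decomposition.

-- ===== PORT A =====
-- the for-loop with early returns; `full` is the whole `str_list` that the body's
-- `.index` calls and slices refer to.  `.getD 0` in the index lookups is never the
-- none case here: the loop element came from `full`, so the element is present.
def solutionLoop (full : List String) : List String → List String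
  | [] => []
  | i :: rest =>
    if i = "l" then
      let left : Nat := (PySem.List.index? full "l").getD 0
      PySem.List.slice full none (some (left : Int))
    else if i = "r" then
      let right : Nat := (PySem.List.index? full "r").getD 0
      PySem.List.slice full (some ((right : Int) + 1)) none
    else solutionLoop full rest

def solution (str_list : List String) : List String :=
  solutionLoop str_list str_list

-- ===== PORT B =====
def solution_alt (str_list : List String) : List String :=
  let n := str_list.length
  let left := (PySem.List.index? str_list "l").getD n
  let right := (PySem.List.index? str_list "r").getD n
  if left = n ∧ right = n then []
  else if left < right then PySem.List.slice str_list none (some (left : Int))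
  else PySem.List.slice str_list (some ((right : Int) + 1)) none

-- ===== PRECONDITION & SPEC =====
def Spec_solution (str_list : List String) (out : List String) : Prop := out = solution_alt str_list
instance (str_list : List String) (out : List String) : Decidable (Spec_solution str_list out) := by unfold Spec_solution; infer_instance

-- ===== CLAIM (what is proved, stated in full; the proofs are below) =====
def Claim_equal_solution : Prop := ∀ (str_list : List String), Dom_solution str_list → Spec_solution str_list (solution str_list)

-- ===== LEMMAS AND PROOFS =====

-- first occurrence right after a prefix that avoids it
theorem index?_pre {α : Type} [BEq α] [LawfulBEq α] (pre rest : List α) (v : α) (h : v ∉ pre) :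
    PySem.List.index? (pre ++ v :: rest) v = some pre.length :=
  (PySem.List.index?_eq_some_iff _ _ _).mpr ⟨pre, rest, rfl, rfl, h⟩

-- first occurrence lies past a prefix that avoids it
theorem index?_skip {α : Type} [BEq α] [LawfulBEq α] (pre rest : List α) (v : α) (h : v ∉ pre) :
    PySem.List.index? (pre ++ rest) v = (PySem.List.index? rest v).map (· + pre.length) := by
  induction pre with
  | nil =>
    simp only [PySem.List.index?_eq_idxOf?]
    cases h' : List.idxOf? v rest <;> simp [h']
  | cons x xs ih =>
    simp only [List.mem_cons, not_or] at h
    rw [List.cons_append, PySem.List.index?_cons_of_ne _ (Ne.symm h.1), ih h.2]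
    cases PySem.List.index? rest v <;> simp <;> omega

-- loop invariant: the elements already scanned (pre) contain neither "l" nor "r"
theorem solutionLoop_eq (rest pre : List String)
    (hl : "l" ∉ pre) (hr : "r" ∉ pre) :
    solutionLoop (pre ++ rest) rest = solution_alt (pre ++ rest) := by
  induction rest generalizing pre with
  | nil =>
    have h1 : PySem.List.index? (pre ++ ([] : List String)) "l" = none :=
      (PySem.List.index?_eq_none_iff _ _).mpr (by simpa using hl)
    have h2 : PySem.List.index? (pre ++ ([] : List String)) "r" = none :=
      (PySem.List.index?_eq_none_iff _ _).mpr (by simpa using hr)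
    simp only [PySem.List.index?_eq_idxOf?, List.append_nil] at h1 h2
    simp [solutionLoop, solution_alt, h1, h2]
  | cons i rest ih =>
    by_cases hil : i = "l"
    · subst hil
      have hidx := index?_pre pre rest "l" hl
      have hrest := index?_skip pre ("l" :: rest) "r" hr
      rw [PySem.List.index?_cons_of_ne rest (show ("l" : String) ≠ "r" by decide)] at hrest
      simp only [PySem.List.index?_eq_idxOf?] at hidx hrest
      cases hc : List.idxOf? "r" rest with
      | none => simp [solutionLoop, solution_alt, hidx, hrest, hc]
      | some k => simp [solutionLoop, solution_alt, hidx, hrest, hc]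
    · by_cases hir : i = "r"
      · subst hir
        have hidx := index?_pre pre rest "r" hr
        have hrest := index?_skip pre ("r" :: rest) "l" hl
        rw [PySem.List.index?_cons_of_ne rest (show ("r" : String) ≠ "l" by decide)] at hrest
        simp only [PySem.List.index?_eq_idxOf?] at hidx hrest
        cases hc : List.idxOf? "l" rest with
        | none => simp [solutionLoop, solution_alt, hidx, hrest, hc]
        | some k => simp [solutionLoop, solution_alt, hidx, hrest, hc]
      · have hl' : "l" ∉ pre ++ [i] := by
          simp only [List.mem_append, List.mem_singleton, not_or]
          exact ⟨hl, fun e => hil e.symm⟩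
        have hr' : "r" ∉ pre ++ [i] := by
          simp only [List.mem_append, List.mem_singleton, not_or]
          exact ⟨hr, fun e => hir e.symm⟩
        have := ih (pre ++ [i]) hl' hr'
        simp only [List.append_assoc, List.singleton_append] at this
        simpa [solutionLoop, hil, hir] using this

-- ===== VERDICT (by name: the statement is the Claim_ definition above) =====
theorem solution_spec : Claim_equal_solution := by
  intro str_list _
  unfold Spec_solution solution
  simpa using solutionLoop_eq str_list [] (by simp) (by simp)
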